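-- pv_equiv track=rewrite | github.com/saran-gangster/chatter_research | src/chatter_twin/rl.py | _merge_count_strings
-- ===== SOURCE A (Python) =====
-- def _merge_count_strings(values) -> str:
--     counts: dict[str, int] = {}
--     for value in values:
--         for item in str(value).split(";"):
--             item = item.strip()
--             if not item or ":" not in item:
--                 continue
--             key, count = item.rsplit(":", 1)
--             try:
--                 counts[key] = counts.get(key, 0) + int(count)
--             except ValueError:
--                 continue
--     return ";".join(f"{key}:{counts[key]}" for key in sorted(counts))
-- ===== SOURCE B (Python) =====
-- def _parse(item):
--     item = item.strip()
--     if not item or ":" not in item: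
--         return None
--     key, _, count = item.rpartition(":")
--     try:
--         return (key, int(count))
--     except ValueError:
--         return None
--
--
-- def _merge_count_strings(values) -> str:
--     pairs = sorted(
--         (p for v in values for p in map(_parse, str(v).split(";")) if p is not None),
--         key=lambda p: p[0],
--     )
--     parts = []
--     while pairs:
--         (key, total), pairs = pairs[0], pairs[1:]
--         while pairs and pairs[0][0] == key:
--             total += pairs[0][1]
--             pairs = pairs[1:]
--         parts.append(f"{key}:{total}")
--     return ";".join(parts)
-- ===== Notes on version B (the rewrite author's own statement) =====
-- stated objective: alternative
-- what changed: Replaces A's hash-table (dict) aggregation followed by a key sort with a sort-then-group pass: parse all (key,count) pairs into a flat list, sort them by key, and sum each adjacent run of equal keys while emitting the output in order.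
import Mathlib
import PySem

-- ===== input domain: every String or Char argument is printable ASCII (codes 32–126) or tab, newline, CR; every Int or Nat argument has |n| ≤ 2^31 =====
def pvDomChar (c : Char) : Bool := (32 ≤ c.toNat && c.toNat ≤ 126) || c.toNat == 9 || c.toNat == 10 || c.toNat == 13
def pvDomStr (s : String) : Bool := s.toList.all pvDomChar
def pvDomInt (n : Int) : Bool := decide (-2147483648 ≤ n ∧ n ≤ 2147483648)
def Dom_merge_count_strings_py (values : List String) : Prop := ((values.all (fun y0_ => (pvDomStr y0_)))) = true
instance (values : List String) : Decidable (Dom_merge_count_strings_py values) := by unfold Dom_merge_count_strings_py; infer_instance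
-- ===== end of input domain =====

-- B replaces A's dict-based incremental aggregation by a sort-then-group pass:
-- parse a flat (key,count) pair list, sort it by key, sum adjacent runs of equal
-- keys (objective: alternative).


-- ===== PORT A =====
-- one strip/filter/rsplit/int step of A's inner loop; rsplit(":",1) with ":" present
-- is ported as slicing around the LAST ':' (PySem.Str.rfind); the int() ValueError
-- branch is PySem.Int.ofStr? = none.
def pvStepItemA (d : PySem.Dict String Int) (item0 : String) : PySem.Dict String Int :=
  let item := PySem.Str.strip item0
  if item == "" || !(PySem.Str.isIn ":" item) then d
  else
    let i := PySem.Str.rfind item ":"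
    let key := PySem.Str.slice item none (some i)
    let count := PySem.Str.slice item (some (i + 1)) none
    match PySem.Int.ofStr? count with
    | some n => d.insert key (d.getD key 0 + n)
    | none => d

def merge_count_strings_py (values : List String) : String :=
  -- split? with sep ";" is always some; getD [] only discharges the option
  let counts := values.foldl (fun d v => ((PySem.Str.split? v ";").getD []).foldl pvStepItemA d) PySem.Dict.empty
  -- counts[key] is ported as getD key 0: every iterated key is in the dict
  PySem.Str.join ";" ((PySem.List.sorted counts.keys (fun k => k) false).map
    (fun k => String.ofList (k.toList ++ ':' :: PySem.Int.toChars (counts.getD k 0))))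

-- ===== PORT B =====
-- Source B's _parse: strip, filter, rpartition on the last ':', int() or None
def pvParseB (item0 : String) : Option (String × Int) :=
  let item := PySem.Str.strip item0
  if item == "" || !(PySem.Str.isIn ":" item) then none
  else
    let i := PySem.Str.rfind item ":"
    match PySem.Int.ofStr? (PySem.Str.slice item (some (i + 1)) none) with
    | some n => some (PySem.Str.slice item none (some i), n)
    | none => none

-- Source B's run-summing while loop: pop the head pair, then consume (takeWhile) the
-- run of pairs with the same key accumulating the total, recurse on the rest.
def pvGroupSum : List (String × Int) → List (String × Int)
  | [] => []
  | (k, c) :: t =>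
    (k, c + ((t.takeWhile (fun p => p.1 == k)).map Prod.snd).sum) ::
      pvGroupSum (t.dropWhile (fun p => p.1 == k))
  termination_by ps => ps.length
  decreasing_by
    simp only [List.length_cons]
    exact Nat.lt_succ_of_le (List.Sublist.length_le (List.dropWhile_sublist _))

def merge_count_strings_py_alt (values : List String) : String :=
  let pairs := PySem.List.sorted
    (values.flatMap (fun v => ((PySem.Str.split? v ";").getD []).filterMap pvParseB))
    (fun p => p.1) false
  PySem.Str.join ";" ((pvGroupSum pairs).map
    (fun p => String.ofList (p.1.toList ++ ':' :: PySem.Int.toChars p.2)))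

-- ===== PRECONDITION & SPEC =====
def Spec_merge_count_strings_py (values : List String) (out : String) : Prop := out = merge_count_strings_py_alt values
instance (values : List String) (out : String) : Decidable (Spec_merge_count_strings_py values out) := by unfold Spec_merge_count_strings_py; infer_instance

-- ===== CLAIM (what is proved, stated in full; the proofs are below) =====
def Claim_equal_merge_count_strings_py : Prop := ∀ (values : List String), Dom_merge_count_strings_py values → Spec_merge_count_strings_py values (merge_count_strings_py values)

-- ===== LEMMAS AND PROOFS =====

-- A's per-item step is B's parse followed by the dict update
theorem pvStepItemA_eq_parse (d : PySem.Dict String Int) (item0 : String) :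
    pvStepItemA d item0 =
      match pvParseB item0 with
      | some p => d.insert p.1 (d.getD p.1 0 + p.2)
      | none => d := by
  simp only [pvStepItemA, pvParseB]
  cases hc : (PySem.Str.strip item0 == "" || !(PySem.Str.isIn ":" (PySem.Str.strip item0)))
  · simp only [Bool.false_eq_true, if_false]
    cases PySem.Int.ofStr? (PySem.Str.slice (PySem.Str.strip item0) (some (PySem.Str.rfind (PySem.Str.strip item0) ":" + 1)) none) <;> rfl
  · simp only [if_true]

-- fold of A's step over a list of items = fold of the dict update over the parsed pairs
theorem pvFold_items_eq (items : List String) (d : PySem.Dict String Int) :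
    items.foldl pvStepItemA d =
      (items.filterMap pvParseB).foldl (fun d p => d.insert p.1 (d.getD p.1 0 + p.2)) d := by
  induction items generalizing d with
  | nil => rfl
  | cons i t ih =>
    simp only [List.foldl_cons, List.filterMap_cons, pvStepItemA_eq_parse]
    cases pvParseB i <;> simp [ih]

-- A's nested fold over values = one fold over the flat pair list
theorem pvFold_values_eq (values : List String) (d : PySem.Dict String Int) :
    values.foldl (fun d v => ((PySem.Str.split? v ";").getD []).foldl pvStepItemA d) d =
      (values.flatMap (fun v => ((PySem.Str.split? v ";").getD []).filterMap pvParseB)).foldl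
        (fun d p => d.insert p.1 (d.getD p.1 0 + p.2)) d := by
  induction values generalizing d with
  | nil => rfl
  | cons v t ih =>
    rw [List.foldl_cons, ih, pvFold_items_eq, List.flatMap_cons, List.foldl_append]

-- the folded dict's entry at k is the sum of the counts parsed under key k
theorem pvGetD_fold (ps : List (String × Int)) (d : PySem.Dict String Int) (k : String) :
    (ps.foldl (fun d p => d.insert p.1 (d.getD p.1 0 + p.2)) d).getD k 0 =
      d.getD k 0 + ((ps.filter (fun p => p.1 == k)).map Prod.snd).sum := by
  induction ps generalizing d with
  | nil => simp
  | cons p t ih =>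
    simp only [List.foldl_cons, List.filter_cons]
    by_cases h : p.1 = k
    · subst h
      simp [ih, add_assoc]
    · have hb : (p.1 == k) = false := by simp [h]
      simp [hb, ih, PySem.Dict.getD_insert, Ne.symm h]

-- the folded dict's keys are the first occurrences of the pair keys, in order
theorem pvKeys_fold (ps : List (String × Int)) (d : PySem.Dict String Int) :
    (ps.foldl (fun d p => d.insert p.1 (d.getD p.1 0 + p.2)) d).keys =
      (ps.map Prod.fst).foldl PySem.Set.add d.keys := by
  induction ps generalizing d with
  | nil => rfl
  | cons p t ih =>
    simp only [List.foldl_cons, List.map_cons, ih]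
    congr 1
    by_cases h : d.contains p.1 = true
    · have hm : p.1 ∈ d.keys := (PySem.Dict.contains_iff_mem_keys d p.1).mp h
      rw [PySem.Dict.keys_insert_of_contains d _ h]
      simp [PySem.Set.add, hm]
    · have h' : d.contains p.1 = false := by simpa using h
      have hm : p.1 ∉ d.keys := fun hmem =>
        absurd ((PySem.Dict.contains_iff_mem_keys d p.1).mpr hmem) (by simp [h'])
      rw [PySem.Dict.keys_insert_of_not_contains d _ h']
      simp [PySem.Set.add, hm]

-- the run heads of B's grouping loop (proof-side skeleton of pvGroupSum)
def pvRunKeys : List (String × Int) → List String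
  | [] => []
  | (k, _) :: t => k :: pvRunKeys (t.dropWhile (fun p => p.1 == k))
  termination_by ps => ps.length
  decreasing_by
    simp only [List.length_cons]
    exact Nat.lt_succ_of_le (List.Sublist.length_le (List.dropWhile_sublist _))

theorem mem_pvRunKeys (ps : List (String × Int)) (k : String) :
    k ∈ pvRunKeys ps ↔ k ∈ ps.map Prod.fst := by
  induction ps using pvRunKeys.induct with
  | case1 => simp [pvRunKeys]
  | case2 k0 c t ih =>
    rw [pvRunKeys]
    simp only [List.mem_cons, List.map_cons, ih]
    constructor
    · rintro (rfl | h)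
      · exact Or.inl rfl
      · exact Or.inr (List.mem_map.mpr (by
          obtain ⟨p, hp, rfl⟩ := List.mem_map.mp h
          exact ⟨p, (List.dropWhile_sublist _).mem hp, rfl⟩))
    · rintro (rfl | h)
      · exact Or.inl rfl
      · obtain ⟨p, hp, rfl⟩ := List.mem_map.mp h
        rw [← List.takeWhile_append_dropWhile (p := fun p => p.1 == k0) (l := t)] at hp
        rcases List.mem_append.mp hp with h1 | h2
        · exact Or.inl (by simpa using List.mem_takeWhile_imp h1)
        · exact Or.inr (List.mem_map.mpr ⟨p, h2, rfl⟩)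

-- in a key-sorted list, every pair after the leading run has a strictly larger key
theorem pvDropWhile_gt (k : String) (c : Int) (t : List (String × Int))
    (hs : ((k, c) :: t).Pairwise (fun a b => a.1 ≤ b.1)) :
    ∀ p ∈ t.dropWhile (fun p => p.1 == k), k < p.1 := by
  have hk : ∀ p ∈ t, k ≤ p.1 := fun p hp => (List.pairwise_cons.mp hs).1 p hp
  have ht : t.Pairwise (fun a b => a.1 ≤ b.1) := (List.pairwise_cons.mp hs).2
  cases hd : t.dropWhile (fun p => p.1 == k) with
  | nil => intro p hp; simp at hp
  | cons q r =>
    have hqf : (q.1 == k) = false := by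
      have h := List.head?_dropWhile_not (p := fun p => p.1 == k) (l := t)
      rw [hd] at h; simpa using h
    have hqt : q ∈ t := (List.dropWhile_sublist _).mem (hd ▸ List.mem_cons_self)
    have hkq : k < q.1 := lt_of_le_of_ne (hk q hqt) (Ne.symm (by simpa using hqf))
    intro p hp
    rcases List.mem_cons.mp hp with rfl | hpr
    · exact hkq
    · have hdrop : (q :: r).Pairwise (fun a b => a.1 ≤ b.1) :=
        hd ▸ List.Pairwise.sublist (List.dropWhile_sublist _) ht
      exact lt_of_lt_of_le hkq ((List.pairwise_cons.mp hdrop).1 p hpr)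

-- on a key-sorted list, B's grouping loop returns, for each run key in order,
-- the key paired with the sum of ALL counts under that key
theorem pvGroupSum_eq (ps : List (String × Int))
    (hs : ps.Pairwise (fun a b => a.1 ≤ b.1)) :
    pvGroupSum ps = (pvRunKeys ps).map
      (fun k => (k, ((ps.filter (fun p => p.1 == k)).map Prod.snd).sum)) := by
  induction ps using pvGroupSum.induct with
  | case1 => simp [pvGroupSum, pvRunKeys]
  | case2 k c t ih =>
    have hgt := pvDropWhile_gt k c t hs
    have hrest : (t.dropWhile (fun p => p.1 == k)).Pairwise (fun a b => a.1 ≤ b.1) :=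
      List.Pairwise.sublist (List.dropWhile_sublist _) (List.pairwise_cons.mp hs).2
    rw [pvGroupSum, pvRunKeys, List.map_cons, ih hrest]
    have hsplit : t = t.takeWhile (fun p => p.1 == k) ++ t.dropWhile (fun p => p.1 == k) :=
      (List.takeWhile_append_dropWhile).symm
    refine List.cons_eq_cons.mpr ⟨?_, ?_⟩
    · -- head: the whole-list filter at k is (k,c) :: the leading run
      have h1 : (t.takeWhile (fun p => p.1 == k)).filter (fun p => p.1 == k) =
          t.takeWhile (fun p => p.1 == k) :=
        List.filter_eq_self.mpr (fun p hp => List.mem_takeWhile_imp (p := fun q : String × Int => q.1 == k) hp)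
      have h2 : (t.dropWhile (fun p => p.1 == k)).filter (fun p => p.1 == k) = [] :=
        List.filter_eq_nil_iff.mpr (fun p hp => by
          have := hgt p hp; simp [ne_of_gt this])
      have hfil : t.filter (fun p => p.1 == k) = t.takeWhile (fun p => p.1 == k) := by
        conv_lhs => rw [hsplit]
        rw [List.filter_append, h1, h2, List.append_nil]
      rw [show ((k, c) :: t).filter (fun p => p.1 == k) =
            (k, c) :: t.filter (fun p => p.1 == k) by simp, hfil]
      simp
    · -- tail: later run keys never match the head key nor its run
      apply List.map_congr_left
      intro k' hk'
      have hk'mem : k' ∈ (t.dropWhile (fun p => p.1 == k)).map Prod.fst :=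
        (mem_pvRunKeys _ _).mp hk'
      obtain ⟨p, hp, rfl⟩ := List.mem_map.mp hk'mem
      have hkk' : k < p.1 := hgt p hp
      have hhead : ((k:String) == p.1) = false := by simp [ne_of_lt hkk']
      have hrun : (t.takeWhile (fun q => q.1 == k)).filter (fun q => q.1 == p.1) = [] :=
        List.filter_eq_nil_iff.mpr (fun q hq => by
          have : q.1 = k := by simpa using List.mem_takeWhile_imp hq
          simp [this, ne_of_lt hkk'])
      have hfil : t.filter (fun q => q.1 == p.1) =
          (t.dropWhile (fun q => q.1 == k)).filter (fun q => q.1 == p.1) := by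
        conv_lhs => rw [hsplit]
        rw [List.filter_append, hrun, List.nil_append]
      rw [show ((k, c) :: t).filter (fun q => q.1 == p.1) =
            t.filter (fun q => q.1 == p.1) by simp [hhead], hfil]

-- the run keys of the key-sorted pair list are strictly increasing
theorem pvRunKeys_pairwise (ps : List (String × Int))
    (hs : ps.Pairwise (fun a b => a.1 ≤ b.1)) :
    (pvRunKeys ps).Pairwise (· < ·) := by
  induction ps using pvRunKeys.induct with
  | case1 => rw [pvRunKeys]; exact List.Pairwise.nil
  | case2 k c t ih =>
    have hgt := pvDropWhile_gt k c t hs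
    have hrest : (t.dropWhile (fun p => p.1 == k)).Pairwise (fun a b => a.1 ≤ b.1) :=
      List.Pairwise.sublist (List.dropWhile_sublist _) (List.pairwise_cons.mp hs).2
    rw [pvRunKeys]
    refine List.pairwise_cons.mpr ⟨?_, ih hrest⟩
    intro k' hk'
    obtain ⟨p, hp, rfl⟩ := List.mem_map.mp ((mem_pvRunKeys _ _).mp hk')
    exact hgt p hp

-- ===== VERDICT (by name: the statement is the Claim_ definition above) =====
theorem merge_count_strings_py_spec : Claim_equal_merge_count_strings_py := by
  intro values _
  simp only [Spec_merge_count_strings_py, merge_count_strings_py, merge_count_strings_py_alt]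
  set pairs0 := values.flatMap (fun v => ((PySem.Str.split? v ";").getD []).filterMap pvParseB) with hpairs0
  set pairs := PySem.List.sorted pairs0 (fun p => p.1) false with hpairs
  have hperm : pairs.Perm pairs0 := PySem.List.sorted_perm _ _ _
  have hsorted : pairs.Pairwise (fun a b => a.1 ≤ b.1) := PySem.List.sorted_pairwise _ _
  -- A's sorted key list IS the run-key list of the sorted pair list
  have hkeys : PySem.List.sorted (PySem.Set.ofList (pairs0.map Prod.fst)) (fun k => k) false =
      pvRunKeys pairs := by
    apply PySem.List.sorted_eq_of_perm_of_pairwise_lt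
    · apply (List.perm_ext_iff_of_nodup ?_ ?_).mpr
      · intro k
        rw [mem_pvRunKeys, PySem.Set.mem_ofList]
        exact (hperm.map Prod.fst).mem_iff
      · exact (pvRunKeys_pairwise pairs hsorted).imp fun h => ne_of_lt h
      · exact PySem.Set.nodup_ofList _
    · exact pvRunKeys_pairwise pairs hsorted
  rw [pvFold_values_eq, pvKeys_fold, pvGroupSum_eq pairs hsorted, List.map_map]
  simp only [PySem.Dict.keys_empty, ← PySem.Set.ofList_eq_foldl, ← hpairs0, hkeys]
  congr 1
  apply List.map_congr_left
  intro k _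
  simp only [Function.comp_apply]
  rw [pvGetD_fold, PySem.Dict.getD_empty, zero_add,
      ((hperm.filter (fun p => p.1 == k)).map Prod.snd).sum_eq]
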